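-- pv_equiv track=rewrite | github.com/alessio-ca/advent_of_code | 2024/21/main.py | create_graph_subset
-- ===== SOURCE A (Python) =====
-- from collections import defaultdict
-- import math
-- import heapq
--
-- Pad = dict[str, dict[str, str]]
--
-- Dist = int | float
--
-- ShortestPrevs = dict[str, set[tuple[str, str]]]
--
-- def create_graph_subset(node: str, pad: Pad) -> ShortestPrevs:
--     """Create graph subset; the subset has the property that each path from `node` to any node
--     is a shortest path between `node` and the target."""
--     q: list[tuple[Dist, str]] = [(0, node)]
--
--     # Lengths is the default dist dictionary
--     lengths: defaultdict[str, Dist] = defaultdict(lambda: math.inf, {node: 0})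
--     # Prev is a subset of Pad where each path from node to any node in Prev
--     # is a shortest path
--     prev: defaultdict[str, set[tuple[str, str]]] = defaultdict(lambda: set())
--
--     # Create the Prev subset graph
--     while q:
--         cost, node = heapq.heappop(q)
--         for edge, neigh in pad[node].items():
--             candidate = cost + 1
--             if candidate <= lengths[neigh]:
--                 # Accepts candidates with same length (multiple shortest paths)
--                 lengths[neigh] = candidate
--                 prev[neigh].add((node, edge))
--                 heapq.heappush(q, (candidate, neigh))
--
--     return prev
-- ===== SOURCE B (Python) =====
-- import math
--
-- def create_graph_subset(node, pad):
--     """Level-by-level BFS (bucket queue) instead of a heap: the frontier of each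
--     distance d is processed in sorted order, relaxed neighbours go to the next bucket."""
--     lengths = {node: 0}
--     prev = {}
--     d = 0
--     cur = [node]
--     while cur:
--         nxt = []
--         for v in sorted(cur):
--             for edge, neigh in pad[v].items():
--                 if d + 1 <= lengths.get(neigh, math.inf):
--                     lengths[neigh] = d + 1
--                     prev[neigh] = prev.get(neigh, set()) | {(v, edge)}
--                     nxt.append(neigh)
--         cur = nxt
--         d += 1
--     return prev
-- ===== Notes on version B (the rewrite author's own statement) =====
-- stated objective: alternative
-- what changed: Replaced the heap-based Dijkstra (heapq priority queue) by a level-by-level BFS with a bucket queue: the current frontier is processed in sorted order and relaxed neighbours are appended to the next level's bucket; no heap is ever maintained.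
import Mathlib
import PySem

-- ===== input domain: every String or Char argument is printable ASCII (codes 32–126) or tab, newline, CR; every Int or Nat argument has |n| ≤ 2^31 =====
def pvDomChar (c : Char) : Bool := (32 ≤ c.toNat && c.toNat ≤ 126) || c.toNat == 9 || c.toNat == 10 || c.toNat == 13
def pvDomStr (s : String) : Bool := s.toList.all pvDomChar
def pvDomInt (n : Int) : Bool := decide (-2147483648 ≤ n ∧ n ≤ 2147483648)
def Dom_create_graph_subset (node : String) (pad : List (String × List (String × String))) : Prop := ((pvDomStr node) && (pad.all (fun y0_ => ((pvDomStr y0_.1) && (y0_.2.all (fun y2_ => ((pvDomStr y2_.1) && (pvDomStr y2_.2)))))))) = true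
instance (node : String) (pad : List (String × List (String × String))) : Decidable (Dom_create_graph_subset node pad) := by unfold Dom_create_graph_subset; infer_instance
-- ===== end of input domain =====

-- B replaces the heap-based Dijkstra by a level-by-level BFS with a bucket queue
-- (current frontier processed in sorted order, relaxed neighbours appended to the
-- next bucket); same return value, no heap maintained.  Objective: alternative.

-- ===== PORT A =====
-- fuel bound shared by both loop ports: a totality guard only (the loops of both
-- Pythons terminate on every input admitted by Pre_; the guard is never claimed tight).
def pvFuel (pad : List (String × List (String × String))) : Nat :=
  (pad.foldl (fun a p => a + p.2.length) 0 + pad.length + 2) ^ (pad.length + 2)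

-- body of A's inner 'for edge, neigh in pad[node].items()' loop.
-- 'lengths' stores only finite distances: defaultdict's math.inf appears solely as the
-- value of absent keys, so 'candidate <= lengths[neigh]' is exactly the 'none => true' arm.
def pvRelaxA (v : String) (cost : Int)
    (st : List (Int × String) × PySem.Dict String Int × PySem.Dict String (PySem.Set (String × String)))
    (en : String × String) :
    List (Int × String) × PySem.Dict String Int × PySem.Dict String (PySem.Set (String × String)) :=
  let candidate := cost + 1
  let ok := match st.2.1.get? en.2 with
    | none => true                      -- lengths[neigh] = inf
    | some L => decide (candidate ≤ L)
  if ok then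
    (st.1 ++ [(candidate, en.2)],       -- heapq.heappush q (candidate, neigh)
     st.2.1.insert en.2 candidate,      -- lengths[neigh] = candidate
     st.2.2.modify en.2 PySem.Set.empty (fun s => PySem.Set.add s (v, en.1)))  -- prev[neigh].add((node, edge))
  else st

-- A's 'while q' loop.  heapq.heappop is ported by its exact contract: it returns the
-- minimum entry under Python's tuple order (cost first, then the node string) and
-- removes one occurrence of it; entries of equal priority are equal pairs, so the
-- popped VALUE and the remaining multiset are exactly Python's.
def pvLoopA (pad : List (String × List (String × String))) :
    Nat → List (Int × String) → PySem.Dict String Int →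
    PySem.Dict String (PySem.Set (String × String)) → PySem.Dict String (PySem.Set (String × String))
  | 0, _, _, prev => prev
  | fuel + 1, q, lengths, prev =>
    match PySem.List.min2? q (·.1) (·.2) with
    | none => prev                                   -- q empty: while exits
    | some cn =>
      let q1 := (PySem.List.remove? q cn).getD q     -- heappop removes the popped entry
      match PySem.Dict.get? (PySem.Dict.mk pad) cn.2 with
      | none => prev                                 -- pad[node] raises KeyError (outside Pre_)
      | some adj =>
        let st := adj.foldl (pvRelaxA cn.2 cn.1) (q1, lengths, prev)
        pvLoopA pad fuel st.1 st.2.1 st.2.2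

def create_graph_subset (node : String) (pad : List (String × List (String × String))) : List (String × List (String × String)) :=
  (pvLoopA pad (pvFuel pad) [(0, node)] (PySem.Dict.mk [(node, 0)]) PySem.Dict.empty).items

-- ===== PORT B =====
-- body of B's inner 'for edge, neigh in pad[v].items()' loop ('lengths.get(neigh, math.inf)'
-- compares against inf exactly as the 'none => true' arm).
def pvRelaxB (v : String) (d : Int)
    (st : List String × PySem.Dict String Int × PySem.Dict String (PySem.Set (String × String)))
    (en : String × String) :
    List String × PySem.Dict String Int × PySem.Dict String (PySem.Set (String × String)) :=
  let ok := match st.2.1.get? en.2 with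
    | none => true
    | some L => decide (d + 1 ≤ L)
  if ok then
    (st.1 ++ [en.2],                    -- nxt.append(neigh)
     st.2.1.insert en.2 (d + 1),        -- lengths[neigh] = d + 1
     st.2.2.insert en.2 (PySem.Set.union (st.2.2.getD en.2 PySem.Set.empty) [(v, en.1)]))  -- prev[neigh] = prev.get(neigh, set()) | {(v, edge)}
  else st

-- B's 'while cur' loop fused with the inner 'for v in sorted(cur)': 'cur' is the
-- unprocessed rest of the sorted current frontier, 'nxt' the next bucket; when 'cur'
-- is exhausted the next bucket is sorted and becomes the frontier of level d+1.
def pvLoopB (pad : List (String × List (String × String))) :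
    Nat → Int → List String → List String → PySem.Dict String Int →
    PySem.Dict String (PySem.Set (String × String)) → PySem.Dict String (PySem.Set (String × String))
  | 0, _, _, _, _, prev => prev
  | fuel + 1, d, cur, nxt, lengths, prev =>
    match cur with
    | v :: rest =>
      match PySem.Dict.get? (PySem.Dict.mk pad) v with
      | none => prev                               -- pad[v] raises KeyError (outside Pre_)
      | some adj =>
        let st := adj.foldl (pvRelaxB v d) (nxt, lengths, prev)
        pvLoopB pad fuel d rest st.1 st.2.1 st.2.2
    | [] =>
      if nxt.isEmpty then prev                     -- while exits
      else pvLoopB pad (fuel + 1) (d + 1) (PySem.List.sorted nxt (fun x => x)) [] lengths prev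
  termination_by fuel _ cur => 2 * fuel + (if cur = [] then 1 else 0)
  decreasing_by
  · split <;> omega
  · have : PySem.List.sorted nxt (fun x => x) ≠ [] := by
      rw [Ne, PySem.List.sorted_eq_nil_iff]
      simpa [List.isEmpty_iff] using ‹¬ nxt.isEmpty = true›
    simp [this]

def create_graph_subset_alt (node : String) (pad : List (String × List (String × String))) : List (String × List (String × String)) :=
  (pvLoopB pad (pvFuel pad) 0 (PySem.List.sorted [node] (fun x => x)) [] (PySem.Dict.mk [(node, 0)]) PySem.Dict.empty).items

-- ===== PRECONDITION & SPEC =====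
-- the set of nodes reachable from `node` expanding only nodes that are pad keys
-- (pad.length + 2 rounds suffice: each round adds a node until the set is stable)
def pvReach (node : String) (pad : List (String × List (String × String))) : List String :=
  (List.range (pad.length + 2)).foldl
    (fun S _ => pad.foldl (fun S2 p => if p.1 ∈ S2 then PySem.Set.update S2 (p.2.map (·.2)) else S2) S)
    (PySem.Set.ofList [node])

-- Pre_ = exactly the inputs on which A returns: every node reachable from `node`
-- (through present keys) is itself a key of pad; otherwise the loop pops a missing
-- node and pad[node] raises KeyError.
def Pre_create_graph_subset (node : String) (pad : List (String × List (String × String))) : Prop :=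
  ∀ v ∈ pvReach node pad, v ∈ pad.map (·.1)
instance (node : String) (pad : List (String × List (String × String))) : Decidable (Pre_create_graph_subset node pad) := by unfold Pre_create_graph_subset; infer_instance

def pvWitness_create_graph_subset : String × (List (String × List (String × String))) :=
  ("A", [("A", [("<", "B"), ("v", "C")]), ("B", [(">", "C")]), ("C", [("^", "A")])])

def Spec_create_graph_subset (node : String) (pad : List (String × List (String × String))) (out : List (String × List (String × String))) : Prop := out = create_graph_subset_alt node pad
instance (node : String) (pad : List (String × List (String × String))) (out : List (String × List (String × String))) : Decidable (Spec_create_graph_subset node pad out) := by unfold Spec_create_graph_subset; infer_instance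

-- ===== CLAIM (what is proved, stated in full; the proofs are below) =====
def Claim_equal_create_graph_subset : Prop := ∀ (node : String) (pad : List (String × List (String × String))), Dom_create_graph_subset node pad → Pre_create_graph_subset node pad → Spec_create_graph_subset node pad (create_graph_subset node pad)

-- ===== LEMMAS AND PROOFS =====

-- Python's tuple order on (cost, node) heap entries
def pvLexLe (a b : Int × String) : Prop := a.1 < b.1 ∨ (a.1 = b.1 ∧ a.2 ≤ b.2)

-- the folding step of PySem.List.min2? at our element type
def pvStep (acc : Option (Int × String)) (x : Int × String) : Option (Int × String) :=
  match acc with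
  | none => some x
  | some m => if (decide (x.1 < m.1) || !decide (m.1 < x.1) && decide (x.2 < m.2)) = true then some x else some m

theorem pvMin2_eq_foldl (q : List (Int × String)) :
    PySem.List.min2? q (·.1) (·.2) = q.foldl pvStep none := by
  unfold PySem.List.min2? pvStep
  congr 1
  funext acc x
  cases acc <;> rfl

theorem pvStep_some (a x : Int × String) :
    pvStep (some a) x
      = if (decide (x.1 < a.1) || !decide (a.1 < x.1) && decide (x.2 < a.2)) = true
        then some x else some a := rfl

theorem pvMin2Fold (t : List (Int × String)) :
    ∀ (a m : Int × String), (m ∈ t ∨ a = m) → (∀ y ∈ t, pvLexLe m y) → pvLexLe m a →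
      t.foldl pvStep (some a) = some m := by
  induction t with
  | nil =>
    intro a m hm _ _
    simpa using hm.resolve_left (by simp)
  | cons x t ih =>
    intro a m hm hallc hma
    have hallx : pvLexLe m x := hallc x (by simp)
    have halt : ∀ y ∈ t, pvLexLe m y := fun y hy => hallc y (List.mem_cons_of_mem _ hy)
    simp only [List.foldl_cons, pvStep_some]
    by_cases hblt : (decide (x.1 < a.1) || !decide (a.1 < x.1) && decide (x.2 < a.2)) = true
    · -- accumulator becomes x
      rw [if_pos hblt]
      simp only [Bool.or_eq_true, Bool.and_eq_true, Bool.not_eq_true', decide_eq_true_eq,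
        decide_eq_false_iff_not] at hblt
      apply ih x m _ halt hallx
      rcases hm with hm | rfl
      · rcases List.mem_cons.mp hm with heq | hmt
        · exact Or.inr heq.symm
        · exact Or.inl hmt
      · -- a = m and x strictly below m contradicts pvLexLe m x
        exfalso
        rcases hallx with h1 | ⟨h1, h2⟩
        · rcases hblt with h | ⟨h, _⟩ <;> omega
        · rcases hblt with h | ⟨_, h⟩
          · omega
          · exact absurd h2 (not_le.mpr h)
    · -- accumulator stays a
      rw [if_neg hblt]
      simp only [Bool.or_eq_true, Bool.and_eq_true, Bool.not_eq_true', decide_eq_true_eq,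
        decide_eq_false_iff_not, not_or, not_and] at hblt
      obtain ⟨hb1, hb2⟩ := hblt
      apply ih a m _ halt hma
      rcases hm with hm | rfl
      · rcases List.mem_cons.mp hm with heq | hmt
        · -- m = x, but x is not below a; with pvLexLe m a this forces a = m
          subst heq
          right
          rcases hma with h1 | ⟨h1, h2⟩
          · exact absurd h1 hb1
          · have hax : ¬ m.2 < a.2 := hb2 (by omega)
            have : a.2 = m.2 := le_antisymm (not_lt.mp hax) h2
            exact Prod.ext (by omega) this
        · exact Or.inl hmt
      · exact Or.inr rfl

theorem pvMin2_eq (q : List (Int × String)) (m : Int × String)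
    (hm : m ∈ q) (hall : ∀ y ∈ q, pvLexLe m y) :
    PySem.List.min2? q (·.1) (·.2) = some m := by
  cases q with
  | nil => cases hm
  | cons x t =>
    rw [pvMin2_eq_foldl]
    have hmem : m ∈ t ∨ x = m := by
      rcases List.mem_cons.mp hm with heq | h
      · exact Or.inr heq.symm
      · exact Or.inl h
    have : (x :: t).foldl pvStep none = t.foldl pvStep (some x) := rfl
    rw [this]
    exact pvMin2Fold t x m hmem (fun y hy => hall y (List.mem_cons_of_mem _ hy)) (hall x (by simp))

-- the inner edge loops of the two ports, run from related states, end in related states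
theorem pvFoldAlign (v : String) (d : Int) (adj : List (String × String)) :
    ∀ (base q : List (Int × String)) (nxt : List String)
      (lengths : PySem.Dict String Int) (prev : PySem.Dict String (PySem.Set (String × String))),
      q.Perm (base ++ nxt.map (fun w => (d + 1, w))) →
      (adj.foldl (pvRelaxA v d) (q, lengths, prev)).2 = (adj.foldl (pvRelaxB v d) (nxt, lengths, prev)).2
      ∧ (adj.foldl (pvRelaxA v d) (q, lengths, prev)).1.Perm
          (base ++ ((adj.foldl (pvRelaxB v d) (nxt, lengths, prev)).1.map (fun w => (d + 1, w)))) := by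
  induction adj with
  | nil => intro base q nxt lengths prev hq; exact ⟨rfl, hq⟩
  | cons en t ih =>
    intro base q nxt lengths prev hq
    simp only [List.foldl_cons]
    by_cases hok : (match lengths.get? en.2 with
      | none => true
      | some L => decide (d + 1 ≤ L)) = true
    · have hA : pvRelaxA v d (q, lengths, prev) en
          = (q ++ [(d + 1, en.2)], lengths.insert en.2 (d + 1),
             (q, lengths, prev).2.2.modify en.2 PySem.Set.empty (fun s => PySem.Set.add s (v, en.1))) := by
        simp only [pvRelaxA, hok, if_pos]
      have hB : pvRelaxB v d (nxt, lengths, prev) en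
          = (nxt ++ [en.2], lengths.insert en.2 (d + 1),
             prev.insert en.2 (PySem.Set.union (prev.getD en.2 PySem.Set.empty) [(v, en.1)])) := by
        simp only [pvRelaxB, hok, if_pos]
      have hprev : (q, lengths, prev).2.2.modify en.2 PySem.Set.empty (fun s => PySem.Set.add s (v, en.1))
          = prev.insert en.2 (PySem.Set.union (prev.getD en.2 PySem.Set.empty) [(v, en.1)]) := rfl
      rw [hA, hB, hprev]
      apply ih
      calc (q ++ [(d + 1, en.2)]).Perm ((base ++ nxt.map (fun w => (d + 1, w))) ++ [(d + 1, en.2)]) :=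
            hq.append_right _
        _ = base ++ ((nxt ++ [en.2]).map (fun w => (d + 1, w))) := by simp
    · have hA : pvRelaxA v d (q, lengths, prev) en = (q, lengths, prev) := by
        simp only [pvRelaxA]
        rw [if_neg hok]
      have hB : pvRelaxB v d (nxt, lengths, prev) en = (nxt, lengths, prev) := by
        simp only [pvRelaxB]
        rw [if_neg hok]
      rw [hA, hB]
      exact ih base q nxt lengths prev hq

-- lockstep simulation: A pops the heap minimum (d, v); B processes the head v of the
-- sorted remaining frontier at level d; states stay equal, queues stay permutations.
theorem pvLock (pad : List (String × List (String × String))) :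
    ∀ (n fuel : Nat) (d : Int) (q : List (Int × String)) (cur nxt : List String)
      (lengths : PySem.Dict String Int) (prev : PySem.Dict String (PySem.Set (String × String))),
      2 * fuel + (if cur = [] then 1 else 0) ≤ n →
      q.Perm (cur.map (fun v => (d, v)) ++ nxt.map (fun v => (d + 1, v))) →
      cur.Pairwise (· ≤ ·) →
      pvLoopA pad fuel q lengths prev = pvLoopB pad fuel d cur nxt lengths prev := by
  intro n
  induction n with
  | zero =>
    intro fuel d q cur nxt lengths prev hn _ _
    have hf : fuel = 0 := by omega
    subst hf
    simp [pvLoopA, pvLoopB]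
  | succ n ih =>
    intro fuel d q cur nxt lengths prev hn hq hcur
    match fuel with
    | 0 => simp [pvLoopA, pvLoopB]
    | fuel + 1 =>
      cases cur with
      | cons v rest =>
        have hmem : (d, v) ∈ q := hq.symm.subset (by simp)
        have hmin : PySem.List.min2? q (·.1) (·.2) = some (d, v) := by
          apply pvMin2_eq q (d, v) hmem
          intro y hy
          have hy' := hq.subset hy
          simp only [List.map_cons, List.cons_append, List.mem_cons, List.mem_append,
            List.mem_map] at hy'
          rcases hy' with rfl | hy' | ⟨w, hw, rfl⟩
          · exact Or.inr ⟨rfl, le_refl _⟩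
          · obtain ⟨u, hu, rfl⟩ := hy'
            exact Or.inr ⟨rfl, (List.pairwise_cons.mp hcur).1 u hu⟩
          · exact Or.inl (by omega)
        have hrm : PySem.List.remove? q (d, v) = some (q.erase (d, v)) :=
          PySem.List.remove?_eq_some_erase q (d, v) hmem
        have hq' : (q.erase (d, v)).Perm
            (rest.map (fun v => (d, v)) ++ nxt.map (fun v => (d + 1, v))) := by
          have h := hq.erase (d, v)
          simpa [List.erase_cons_head] using h
        simp only [pvLoopA, pvLoopB, hmin, hrm, Option.getD_some]
        cases hpad : PySem.Dict.get? (PySem.Dict.mk pad) v with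
        | none => dsimp only
        | some adj =>
          dsimp only
          obtain ⟨h2, h1⟩ := pvFoldAlign v d adj (rest.map (fun v => (d, v))) (q.erase (d, v))
            nxt lengths prev hq'
          have h21 : (adj.foldl (pvRelaxA v d) (q.erase (d, v), lengths, prev)).2.1
              = (adj.foldl (pvRelaxB v d) (nxt, lengths, prev)).2.1 := by rw [h2]
          have h22 : (adj.foldl (pvRelaxA v d) (q.erase (d, v), lengths, prev)).2.2
              = (adj.foldl (pvRelaxB v d) (nxt, lengths, prev)).2.2 := by rw [h2]
          rw [h21, h22]
          exact ih fuel d _ rest _ _ _ (by split <;> omega) h1 (List.pairwise_cons.mp hcur).2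
      | nil =>
        cases hnxt : nxt with
        | nil =>
          have hqnil : q = [] := by
            apply List.Perm.eq_nil
            subst hnxt
            simpa using hq
          subst hqnil hnxt
          simp [pvLoopA, pvLoopB, pvMin2_eq_foldl]
        | cons w ws =>
          subst hnxt
          simp only [pvLoopB, List.isEmpty_cons, Bool.false_eq_true, ite_false]
          have hsp : (PySem.List.sorted (w :: ws) (fun x => x)).Perm (w :: ws) :=
            PySem.List.sorted_perm ..
          have hsne : PySem.List.sorted (w :: ws) (fun x => x) ≠ [] := by
            rw [Ne, PySem.List.sorted_eq_nil_iff]; simp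
          exact ih (fuel + 1) (d + 1) q (PySem.List.sorted (w :: ws) (fun x => x)) []
            lengths prev (by simp only [if_neg hsne]; simp at hn; omega)
            (by
              refine hq.trans ?_
              simp only [List.map_nil, List.nil_append, List.append_nil]
              exact ((hsp.map (fun v => (d + 1, v))).symm))
            (by have := PySem.List.sorted_pairwise (xs := w :: ws) (key := fun x => x); simpa using this)

-- ===== VERDICT (by name: the statement is the Claim_ definition above) =====
theorem create_graph_subset_spec : Claim_equal_create_graph_subset := by
  intro node pad _ _
  unfold Spec_create_graph_subset create_graph_subset create_graph_subset_alt
  have hs : PySem.List.sorted [node] (fun x => x) = [node] := rfl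
  rw [hs, pvLock pad (2 * pvFuel pad + 1) (pvFuel pad) 0 [(0, node)] [node] [] _ _
    (by simp) (by simp) (by simp)]
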